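-- pv_equiv track=rewrite | github.com/vovapasko/ads | books/dynamic_programming/add_untill_100.py | add_until_100
-- ===== SOURCE A (Python) =====
-- def add_until_100(arr: list):
--     if len(arr) == 0:
--         return 0
--     tmp = add_until_100(arr[1:])
--     if arr[0] + tmp > 100:
--         return tmp
--     else:
--         return arr[0] + tmp
-- ===== SOURCE B (Python) =====
-- def add_until_100(arr: list):
--     total = 0
--     for x in reversed(arr):
--         if x + total <= 100:
--             total = x + total
--     return total
-- ===== Notes on version B (the rewrite author's own statement) =====
-- stated objective: simpler
-- what changed: Replaced recursion over the tail (which copies arr[1:] at each step) with a single iterative pass over reversed(arr) maintaining an accumulator.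
import Mathlib
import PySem

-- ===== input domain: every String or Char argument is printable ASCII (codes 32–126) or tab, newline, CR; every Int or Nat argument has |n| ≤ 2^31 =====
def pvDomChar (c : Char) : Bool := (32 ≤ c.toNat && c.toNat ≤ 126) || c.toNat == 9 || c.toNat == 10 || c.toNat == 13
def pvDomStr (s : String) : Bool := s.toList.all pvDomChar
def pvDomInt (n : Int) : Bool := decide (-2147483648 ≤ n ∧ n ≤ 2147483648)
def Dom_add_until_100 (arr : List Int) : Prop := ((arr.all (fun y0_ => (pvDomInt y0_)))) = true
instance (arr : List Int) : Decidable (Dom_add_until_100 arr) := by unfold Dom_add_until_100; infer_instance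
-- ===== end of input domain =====

-- B replaces A's tail recursion (O(n^2) from per-call slicing) by one iterative pass over reversed(arr) with an accumulator.

-- ===== PORT A =====
def add_until_100 (arr : List Int) : Int :=
  match arr with
  | [] => 0
  | x :: xs =>
    let tmp := add_until_100 xs
    if x + tmp > 100 then tmp else x + tmp

-- ===== PORT B =====
def add_until_100_alt (arr : List Int) : Int :=
  arr.reverse.foldl (fun total x => if x + total ≤ 100 then x + total else total) 0

-- ===== PRECONDITION & SPEC =====
def Spec_add_until_100 (arr : List Int) (out : Int) : Prop := out = add_until_100_alt arr
instance (arr : List Int) (out : Int) : Decidable (Spec_add_until_100 arr out) := by unfold Spec_add_until_100; infer_instance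

-- ===== CLAIM (what is proved, stated in full; the proofs are below) =====
def Claim_equal_add_until_100 : Prop := ∀ (arr : List Int), Dom_add_until_100 arr → Spec_add_until_100 arr (add_until_100 arr)

-- ===== LEMMAS AND PROOFS =====
theorem alt_cons (x : Int) (xs : List Int) :
    add_until_100_alt (x :: xs) =
      (if x + add_until_100_alt xs ≤ 100 then x + add_until_100_alt xs else add_until_100_alt xs) := by
  simp [add_until_100_alt, List.foldl_append]

theorem eq_all (arr : List Int) : add_until_100 arr = add_until_100_alt arr := by
  induction arr with
  | nil => simp [add_until_100, add_until_100_alt]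
  | cons x xs ih =>
    rw [alt_cons, ← ih]
    simp only [add_until_100]
    split_ifs <;> omega

-- ===== VERDICT (by name: the statement is the Claim_ definition above) =====
theorem add_until_100_spec : Claim_equal_add_until_100 := by
  intro arr _
  exact eq_all arr
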